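-- pv_equiv track=rewrite | github.com/Myriad-Dreamin/pycanalysis | pycanalysis.py | split_source_by_preprocess_commands
-- ===== SOURCE A (Python) =====
-- import collections
--
-- FilteredStringPart = collections.namedtuple('FilteredStringPart', ['filtered', 'offset', 'content'])
--
-- def split_source_by_preprocess_commands(source):
--     """
--     split source code by the preprocess commands
--     command \\in '#' { define, undef, ifdef, ifndef, if, else, elif, endif, include, error, pragma }
--     :param source: the source code text
--     :return: the splitting result
--     """
--     offset = 0
--     string_fragments = []
--     while offset < len(source):
--         if source[offset] == '#':
--             left_most = offset
--             width = 1
--         else: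
--             left_most = source.find('\n#', offset)
--             width = 2
--         if left_most == -1:
--             string_fragments.append(FilteredStringPart(False, offset, source[offset:]))
--             return string_fragments
--         if offset != left_most:
--             string_fragments.append(FilteredStringPart(False, offset, source[offset:left_most]))
--         fixed = left_most + width
--         while True:
--             first_right = source.find('\n', fixed)
--             if first_right == -1:
--                 string_fragments.append(FilteredStringPart(True, left_most + width - 1, source[left_most:]))
--                 return string_fragments
--             if source[first_right - 1] == '\\':
--                 fixed = first_right + 1
--                 continue
--             break
--
--         string_fragments.append(FilteredStringPart(True, left_most + width - 1, source[left_most:first_right + 1]))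
--         offset = first_right + 1
--     return string_fragments
-- ===== SOURCE B (Python) =====
-- # Line-based re-implementation: split the source into physical lines, accumulate
-- # runs of normal lines, and build each preprocessor fragment by absorbing
-- # backslash-continuation lines one at a time.
-- import collections
--
-- FilteredStringPart = collections.namedtuple('FilteredStringPart', ['filtered', 'offset', 'content'])
--
-- def split_source_by_preprocess_commands(source):
--     # physical lines, each keeping its trailing '\n' (last one may lack it)
--     lines = []
--     cur = []
--     for ch in source:
--         cur.append(ch)
--         if ch == '\n':
--             lines.append(''.join(cur))
--             cur = []
--     if cur:
--         lines.append(''.join(cur))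
--     frags = []
--     pos = 0
--     norm_start = 0
--     norm = []
--     i = 0
--     n = len(lines)
--     while i < n:
--         ln = lines[i]
--         if ln.startswith('#'):
--             lead = ''
--             if norm:
--                 # the newline just before '#' moves into the preprocessor fragment
--                 text = ''.join(norm)[:-1]
--                 lead = '\n'
--                 if text:
--                     frags.append(FilteredStringPart(False, norm_start, text))
--                 norm = []
--             start = pos
--             body = ln
--             pos += len(ln)
--             i += 1
--             while body.endswith('\\\n') and i < n:
--                 body += lines[i]
--                 pos += len(lines[i])
--                 i += 1
--             frags.append(FilteredStringPart(True, start, lead + body))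
--             norm_start = pos
--         else:
--             if not norm:
--                 norm_start = pos
--             norm.append(ln)
--             pos += len(ln)
--             i += 1
--     if norm:
--         frags.append(FilteredStringPart(False, norm_start, ''.join(norm)))
--     return frags
-- ===== Notes on version B (the rewrite author's own statement) =====
-- stated objective: alternative
-- what changed: A repeatedly calls str.find over absolute character offsets with an inner find-loop for continuations; B instead splits the source into physical lines in one pass and then walks the line list, accumulating runs of normal lines and absorbing backslash-continuation lines into each preprocessor fragment.
import Mathlib
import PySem

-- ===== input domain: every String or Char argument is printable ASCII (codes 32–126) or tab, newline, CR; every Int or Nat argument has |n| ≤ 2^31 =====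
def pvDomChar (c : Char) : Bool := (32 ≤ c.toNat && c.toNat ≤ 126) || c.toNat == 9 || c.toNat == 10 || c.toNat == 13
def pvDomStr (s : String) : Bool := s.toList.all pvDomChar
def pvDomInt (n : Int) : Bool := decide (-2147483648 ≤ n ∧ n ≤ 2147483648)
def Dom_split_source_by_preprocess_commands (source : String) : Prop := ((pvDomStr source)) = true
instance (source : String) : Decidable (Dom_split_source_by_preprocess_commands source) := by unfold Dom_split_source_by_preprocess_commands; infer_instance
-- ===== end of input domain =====

-- B is a line-based re-implementation (different decomposition) of A's char-offset find() scan;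
-- proved to return exactly A's fragments on every input (A is total).

-- ===== PORT A =====
-- A works with absolute character offsets into the full source; ported over List Char,
-- with str.find → PySem.Chars.findFrom and indexing → PySem.List.pyGet? (exact, incl. negative wrap).

-- termination helper for the find-based loops (cited by decreasing_by)
theorem pvFindFrom_ge (cs sub : List Char) (f : Nat) (hsub : sub ≠ [])
    (h : PySem.Chars.findFrom cs sub (f : Int) none ≠ -1) :
    f ≤ (PySem.Chars.findFrom cs sub (f : Int) none).toNat ∧
      (PySem.Chars.findFrom cs sub (f : Int) none).toNat < cs.length := by
  by_cases hf : f ≤ cs.length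
  · obtain ⟨h1, h2, -⟩ := PySem.Chars.findFrom_natCast_spec cs sub f hf h
    have hne : List.drop (PySem.Chars.findFrom cs sub ↑f none).toNat cs ≠ [] := by
      intro hnil
      rw [hnil] at h2
      exact hsub (List.prefix_nil.mp h2)
    refine ⟨?_, ?_⟩
    · omega
    · by_contra hlt
      push_neg at hlt
      exact hne (List.drop_eq_nil_of_le hlt)
  · exfalso
    apply h
    simp only [PySem.Chars.findFrom]
    rw [if_neg (show ¬((f : Int) < 0) by omega), if_pos (by push_cast; omega)]

-- inner while loop of A: scan for the terminating newline, skipping backslash continuations;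
-- returns none where A appends the tail and returns (find == -1), some first_right on break
def pvAInner (cs : List Char) (fixed : Nat) : Option Nat :=
  let first_right := PySem.Chars.findFrom cs ['\n'] (fixed : Int) none
  if h : first_right = -1 then none
  else if PySem.List.pyGet? cs (first_right - 1) = some '\\' then
    pvAInner cs (first_right.toNat + 1)
  else some first_right.toNat
termination_by cs.length - fixed
decreasing_by
  have := pvFindFrom_ge cs ['\n'] fixed (by simp) h
  omega

theorem pvAInner_some_ge (cs : List Char) (f fr : Nat) (h : pvAInner cs f = some fr) :
    f ≤ fr ∧ fr < cs.length := by
  fun_induction pvAInner cs f with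
  | case1 f first_right h1 => simp at h
  | case2 f first_right h1 h2 ih =>
      have := pvFindFrom_ge cs ['\n'] f (by simp) h1
      have := ih h
      omega
  | case3 f first_right h1 h2 =>
      have := pvFindFrom_ge cs ['\n'] f (by simp) h1
      simp only [Option.some.injEq] at h
      omega

-- outer while loop of A
def pvALoop (cs : List Char) (offset : Nat) (frags : List (Bool × Int × String)) :
    List (Bool × Int × String) :=
  if hlt : offset < cs.length then
    let lw : Int × Nat :=
      if PySem.List.pyGet? cs (offset : Int) = some '#' then ((offset : Int), 1)
      else (PySem.Chars.findFrom cs ['\n', '#'] (offset : Int) none, 2)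
    if hm1 : lw.1 = -1 then
      frags ++ [(false, (offset : Int), String.ofList (PySem.List.slice cs (some (offset : Int)) none))]
    else
      let frags1 :=
        if (offset : Int) ≠ lw.1 then
          frags ++ [(false, (offset : Int),
            String.ofList (PySem.List.slice cs (some (offset : Int)) (some lw.1)))]
        else frags
      match hfr : pvAInner cs (lw.1.toNat + lw.2) with
      | none =>
          frags1 ++ [(true, lw.1 + (lw.2 : Int) - 1,
            String.ofList (PySem.List.slice cs (some lw.1) none))]
      | some fr =>
          pvALoop cs (fr + 1)
            (frags1 ++ [(true, lw.1 + (lw.2 : Int) - 1,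
              String.ofList (PySem.List.slice cs (some lw.1) (some ((fr : Int) + 1))))])
  else frags
termination_by cs.length - offset
decreasing_by
  have hge := pvAInner_some_ge cs (lw.1.toNat + lw.2) fr hfr
  by_cases hc : PySem.List.pyGet? cs (offset : Int) = some '#'
  · have hlw : lw = ((offset : Int), 1) := by simp only [lw]; rw [dif_pos hc]
    rw [hlw] at hge
    simp only [Int.toNat_natCast] at hge
    omega
  · have hlw : lw = (PySem.Chars.findFrom cs ['\n', '#'] (offset : Int) none, 2) := by
      simp only [lw]; rw [dif_neg hc]
    rw [hlw] at hge hm1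
    have h2 := pvFindFrom_ge cs ['\n', '#'] offset (by simp) hm1
    omega

def split_source_by_preprocess_commands (source : String) : List (Bool × Int × String) :=
  pvALoop source.toList 0 []

-- ===== PORT B =====
-- literal port of Source B: build the physical lines by one scan, then walk them,
-- accumulating normal runs and absorbing backslash continuations into '#'-fragments

def pvBLines (cs : List Char) : List (List Char) :=
  let st := cs.foldl
    (fun (st : List (List Char) × List Char) ch =>
      let cur := st.2 ++ [ch]
      if ch = '\n' then (st.1 ++ [cur], []) else (st.1, cur))
    ([], [])
  if st.2 ≠ [] then st.1 ++ [st.2] else st.1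

-- inner while loop of B
def pvAbsorb (lines : List (List Char)) (body : List Char) (pos : Nat) :
    List Char × Nat × List (List Char) :=
  if PySem.Chars.endswith body ['\\', '\n'] then
    match lines with
    | [] => (body, pos, [])
    | l :: rest => pvAbsorb rest (body ++ l) (pos + l.length)
  else (body, pos, lines)

theorem pvAbsorb_rest_length (lines : List (List Char)) (body : List Char) (pos : Nat) :
    (pvAbsorb lines body pos).2.2.length ≤ lines.length := by
  fun_induction pvAbsorb lines body pos with
  | case1 => simp [pvAbsorb]
  | case2 => simp_all [pvAbsorb]; omega
  | case3 => simp [pvAbsorb]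

-- outer while loop of B
def pvBLoop (lines : List (List Char)) (pos norm_start : Nat) (norm : List (List Char))
    (frags : List (Bool × Int × String)) : List (Bool × Int × String) :=
  match lines with
  | [] =>
      if norm ≠ [] then
        frags ++ [(false, (norm_start : Int), String.ofList (PySem.Chars.join [] norm))]
      else frags
  | ln :: rest =>
      if PySem.Chars.startswith ln ['#'] then
        let fl : List (Bool × Int × String) × List Char :=
          if norm ≠ [] then
            let text := PySem.List.slice (PySem.Chars.join [] norm) none (some (-1))
            ((if text ≠ [] then
                frags ++ [(false, (norm_start : Int), String.ofList text)]
              else frags), ['\n'])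
          else (frags, [])
        let r := pvAbsorb rest ln (pos + ln.length)
        pvBLoop r.2.2 r.2.1 r.2.1 []
          (fl.1 ++ [(true, (pos : Int), String.ofList (fl.2 ++ r.1))])
      else
        pvBLoop rest (pos + ln.length) (if norm = [] then pos else norm_start)
          (norm ++ [ln]) frags
termination_by lines.length
decreasing_by
  · have := pvAbsorb_rest_length rest ln (pos + ln.length)
    simp only [List.length_cons]
    omega
  · simp

def split_source_by_preprocess_commands_alt (source : String) : List (Bool × Int × String) :=
  pvBLoop (pvBLines source.toList) 0 0 [] []

-- ===== PRECONDITION & SPEC =====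
def Spec_split_source_by_preprocess_commands (source : String) (out : List (Bool × Int × String)) : Prop := out = split_source_by_preprocess_commands_alt source
instance (source : String) (out : List (Bool × Int × String)) : Decidable (Spec_split_source_by_preprocess_commands source out) := by unfold Spec_split_source_by_preprocess_commands; infer_instance

-- ===== CLAIM (what is proved, stated in full; the proofs are below) =====
def Claim_equal_split_source_by_preprocess_commands : Prop := ∀ (source : String), Dom_split_source_by_preprocess_commands source → Spec_split_source_by_preprocess_commands source (split_source_by_preprocess_commands source)

-- ===== LEMMAS AND PROOFS =====

-- ---------- generic list/char utilities ----------

theorem pvPrefix_one (y : List Char) (a : Char) : [a] <+: y ↔ y[0]? = some a := by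
  cases y with
  | nil => simp
  | cons b t => simp [List.cons_prefix_cons, eq_comm]

theorem pvPrefix_two (y : List Char) (a b : Char) :
    [a, b] <+: y ↔ y[0]? = some a ∧ y[1]? = some b := by
  cases y with
  | nil => simp
  | cons c t =>
    cases t with
    | nil => simp [List.cons_prefix_cons]
    | cons d t' => simp [List.cons_prefix_cons, and_assoc, eq_comm]

theorem pvDrop_ne_nil_lt {cs : List Char} {n : Nat} (h : cs.drop n ≠ []) : n < cs.length := by
  by_contra hc
  exact h (List.drop_eq_nil_of_le (by omega))

theorem pvJoin_flatten (parts : List (List Char)) :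
    PySem.Chars.join [] parts = parts.flatten := by
  show List.intercalate [] parts = parts.flatten
  induction parts with
  | nil => rfl
  | cons p ps ih =>
    cases ps with
    | nil => simp [List.intercalate]
    | cons q ps' => simp_all [List.intercalate, List.intersperse]

-- ---------- good line lists ----------

def pvGood (L : List (List Char)) : Prop :=
  (∀ l ∈ L, l ≠ [] ∧ '\n' ∉ l.dropLast) ∧ (∀ l ∈ L.dropLast, l.getLast? = some '\n')

theorem pvGood_suffix {L L' : List (List Char)} (h : L' <:+ L) (hG : pvGood L) : pvGood L' := by
  obtain ⟨w, rfl⟩ := h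
  refine ⟨fun l hl => hG.1 l (by simp [hl]), fun l hl => ?_⟩
  cases hL' : L' with
  | nil => simp [hL'] at hl
  | cons a t =>
    apply hG.2
    rw [hL'] at hl ⊢
    rw [List.dropLast_append_of_ne_nil (by simp)]
    simp [hl]

theorem pvGood_tail {l : List Char} {L : List (List Char)} (hG : pvGood (l :: L)) : pvGood L :=
  pvGood_suffix (List.suffix_cons l L) hG

theorem pvFlatten_ne_nil {L : List (List Char)} (h : ∀ l ∈ L, l ≠ []) (hL : L ≠ []) :
    L.flatten ≠ [] := by
  cases L with
  | nil => exact absurd rfl hL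
  | cons l t =>
    have := h l (by simp)
    simp only [List.flatten_cons]
    intro hc
    rw [List.append_eq_nil_iff] at hc
    exact this hc.1

theorem pvStartswith_hash_iff (l : List Char) :
    PySem.Chars.startswith l ['#'] = true ↔ l[0]? = some '#' := by
  rw [PySem.Chars.startswith_iff, pvPrefix_one]

-- ---------- endswith characterisations ----------

theorem pvEndswith_concat (y0 : List Char) :
    PySem.Chars.endswith (y0 ++ ['\n']) ['\\', '\n'] = true ↔ y0.getLast? = some '\\' := by
  rw [PySem.Chars.endswith_iff]
  constructor
  · rintro ⟨s, hs⟩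
    have h2 : s ++ ['\\'] = y0 := by
      have h1 : (s ++ ['\\']) ++ ['\n'] = y0 ++ ['\n'] := by simpa [List.append_assoc] using hs
      exact List.append_cancel_right h1
    rw [← h2, List.getLast?_concat]
  · intro h
    obtain ⟨y1, rfl⟩ := List.getLast?_eq_some_iff.mp h
    exact ⟨y1, by simp⟩

-- ---------- find characterisations ----------

theorem pvFindNL (cs u w : List Char) (f : Nat)
    (hf : cs.drop f = u ++ '\n' :: w) (hu : '\n' ∉ u) :
    PySem.Chars.findFrom cs ['\n'] (f : Int) none = ((f + u.length : Nat) : Int) := by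
  have hfle : f ≤ cs.length := by
    have : cs.drop f ≠ [] := by rw [hf]; simp
    have := pvDrop_ne_nil_lt this
    omega
  have hne : PySem.Chars.findFrom cs ['\n'] (f : Int) none ≠ -1 := by
    intro hcon
    rw [PySem.Chars.findFrom_natCast_eq_neg_one_iff cs ['\n'] f hfle] at hcon
    exact hcon ⟨u, w, by rw [hf]; simp⟩
  obtain ⟨h1, h2, h3⟩ := PySem.Chars.findFrom_natCast_spec cs ['\n'] f hfle hne
  set r := (PySem.Chars.findFrom cs ['\n'] (f : Int) none).toNat with hrdef
  have hfr : PySem.Chars.findFrom cs ['\n'] (f : Int) none = (r : Int) := by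
    rw [hrdef, Int.toNat_of_nonneg (le_trans (Int.natCast_nonneg f) h1)]
  have hfle2 : f ≤ r := by rw [hfr] at h1; exact_mod_cast h1
  have hprefu : ['\n'] <+: cs.drop (f + u.length) := by
    have : cs.drop (f + u.length) = '\n' :: w := by
      rw [← List.drop_drop, hf, List.drop_left]
    rw [this]
    simp
  have hler : r ≤ f + u.length := by
    by_contra hgt
    exact h3 (f + u.length) (by omega) (by omega) hprefu
  have hge : f + u.length ≤ r := by
    by_contra hlt
    have hch : cs[r]? = some '\n' := by
      rw [pvPrefix_one] at h2
      rw [List.getElem?_drop, Nat.add_zero] at h2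
      exact h2
    have hru : (u ++ '\n' :: w)[r - f]? = some '\n' := by
      rw [← hf, List.getElem?_drop, show f + (r - f) = r by omega]
      exact hch
    rw [List.getElem?_append_left (by omega)] at hru
    exact hu (List.mem_of_getElem? hru)
  rw [hfr]
  congr 1
  omega

theorem pvFindNL_none (cs : List Char) (f : Nat) (hfle : f ≤ cs.length)
    (h : ('\n') ∉ cs.drop f) :
    PySem.Chars.findFrom cs ['\n'] (f : Int) none = -1 := by
  rw [PySem.Chars.findFrom_natCast_eq_neg_one_iff cs ['\n'] f hfle]
  rintro ⟨s, t, hst⟩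
  apply h
  rw [← hst]
  simp

theorem pvFindNH_pos (cs u0 v : List Char) (f : Nat)
    (hf : cs.drop f = u0 ++ '\n' :: '#' :: v)
    (hfree : ∀ j, j + 1 ≤ u0.length → ¬ (['\n', '#'] <+: cs.drop (f + j))) :
    PySem.Chars.findFrom cs ['\n', '#'] (f : Int) none = ((f + u0.length : Nat) : Int) := by
  have hfle : f ≤ cs.length := by
    have : cs.drop f ≠ [] := by rw [hf]; simp
    have := pvDrop_ne_nil_lt this
    omega
  have hne : PySem.Chars.findFrom cs ['\n', '#'] (f : Int) none ≠ -1 := by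
    intro hcon
    rw [PySem.Chars.findFrom_natCast_eq_neg_one_iff cs ['\n', '#'] f hfle] at hcon
    exact hcon ⟨u0, v, by rw [hf]; simp⟩
  obtain ⟨h1, h2, h3⟩ := PySem.Chars.findFrom_natCast_spec cs ['\n', '#'] f hfle hne
  set r := (PySem.Chars.findFrom cs ['\n', '#'] (f : Int) none).toNat with hrdef
  have hfr : PySem.Chars.findFrom cs ['\n', '#'] (f : Int) none = (r : Int) := by
    rw [hrdef, Int.toNat_of_nonneg (le_trans (Int.natCast_nonneg f) h1)]
  have hfle2 : f ≤ r := by rw [hfr] at h1; exact_mod_cast h1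
  have hprefu : ['\n', '#'] <+: cs.drop (f + u0.length) := by
    have : cs.drop (f + u0.length) = '\n' :: '#' :: v := by
      rw [← List.drop_drop, hf, List.drop_left]
    rw [this]
    exact ⟨v, rfl⟩
  have hler : r ≤ f + u0.length := by
    by_contra hgt
    exact h3 (f + u0.length) (by omega) (by omega) hprefu
  have hge : f + u0.length ≤ r := by
    by_contra hlt
    refine hfree (r - f) (by omega) ?_
    rw [show f + (r - f) = r by omega]
    exact h2
  rw [hfr]
  congr 1
  omega

theorem pvNH_flat (L : List (List Char)) (hG : pvGood L)
    (hns : ∀ l ∈ L, PySem.Chars.startswith l ['#'] = false) :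
    ∀ j, j + 2 ≤ L.flatten.length →
      ¬ (L.flatten[j]? = some '\n' ∧ L.flatten[j + 1]? = some '#') := by
  induction L with
  | nil => simp
  | cons l L' ih =>
    intro j hj ⟨hnl, hsh⟩
    simp only [List.flatten_cons] at hnl hsh hj
    rcases Nat.lt_trichotomy (j + 1) l.length with hlt | heq | hgt
    · rw [List.getElem?_append_left (by omega)] at hnl
      have hdl : l.dropLast[j]? = some '\n' := by
        rw [List.getElem?_dropLast]
        simp [show j < l.length - 1 by omega, hnl]
      exact (hG.1 l (by simp)).2 (List.mem_of_getElem? hdl)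
    · rw [List.getElem?_append_right (by omega), show j + 1 - l.length = 0 by omega] at hsh
      cases L' with
      | nil => simp at hsh
      | cons l2 t2 =>
        have hl2 : l2 ≠ [] := ((pvGood_tail hG).1 l2 (by simp)).1
        rw [List.flatten_cons, List.getElem?_append_left (by
          cases l2 with | nil => exact absurd rfl hl2 | cons a b => simp)] at hsh
        have := hns l2 (by simp)
        rw [← Bool.not_eq_true, pvStartswith_hash_iff] at this
        exact this hsh
    · rw [List.getElem?_append_right (by omega)] at hnl
      rw [List.getElem?_append_right (by omega)] at hsh
      rw [List.length_append] at hj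
      refine ih (pvGood_tail hG) (fun x hx => hns x (by simp [hx])) (j - l.length)
        (by omega) ⟨hnl, by rw [show j - l.length + 1 = j + 1 - l.length by omega]; exact hsh⟩

theorem pvFindNH_none (cs : List Char) (f : Nat) (L : List (List Char))
    (hfle : f ≤ cs.length) (hd : cs.drop f = L.flatten) (hG : pvGood L)
    (hns : ∀ l ∈ L, PySem.Chars.startswith l ['#'] = false) :
    PySem.Chars.findFrom cs ['\n', '#'] (f : Int) none = -1 := by
  rw [PySem.Chars.findFrom_natCast_eq_neg_one_iff cs ['\n', '#'] f hfle]
  rintro ⟨s, t, hst⟩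
  rw [hd] at hst
  have hlen : s.length + 2 ≤ L.flatten.length := by
    rw [← hst]
    simp only [List.length_append, List.length_cons, List.length_nil]
    omega
  refine pvNH_flat L hG hns s.length hlen ⟨?_, ?_⟩
  · rw [← hst, List.getElem?_append_left
      (by simp only [List.length_append, List.length_cons, List.length_nil]; omega),
      List.getElem?_append_right (le_refl _)]
    simp
  · rw [← hst, List.getElem?_append_left
      (by simp only [List.length_append, List.length_cons, List.length_nil]; omega),
      List.getElem?_append_right (by simp)]
    simp

-- ---------- equation lemmas for the ports ----------

theorem pvAInner_none_of (cs : List Char) (f : Nat)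
    (hfind : PySem.Chars.findFrom cs ['\n'] (f : Int) none = -1) :
    pvAInner cs f = none := by
  rw [pvAInner]
  simp [hfind]

theorem pvAInner_break (cs : List Char) (f fr : Nat)
    (hfind : PySem.Chars.findFrom cs ['\n'] (f : Int) none = (fr : Int))
    (htest : ¬ PySem.List.pyGet? cs ((fr : Int) - 1) = some '\\') :
    pvAInner cs f = some fr := by
  rw [pvAInner]
  simp only [hfind]
  rw [dif_neg (show ¬((fr : Int) = -1) by omega)]
  simp [htest]

theorem pvAInner_cont (cs : List Char) (f fr : Nat)
    (hfind : PySem.Chars.findFrom cs ['\n'] (f : Int) none = (fr : Int))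
    (htest : PySem.List.pyGet? cs ((fr : Int) - 1) = some '\\') :
    pvAInner cs f = pvAInner cs (fr + 1) := by
  rw [pvAInner]
  simp only [hfind]
  rw [dif_neg (show ¬((fr : Int) = -1) by omega)]
  simp [htest]

theorem pvAbsorb_nil (body : List Char) (pos : Nat) :
    pvAbsorb [] body pos = (body, pos, []) := by
  rw [pvAbsorb.eq_def]
  split <;> rfl

theorem pvAbsorb_stop (lines : List (List Char)) (body : List Char) (pos : Nat)
    (h : PySem.Chars.endswith body ['\\', '\n'] = false) :
    pvAbsorb lines body pos = (body, pos, lines) := by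
  rw [pvAbsorb.eq_def]
  simp [h]

theorem pvAbsorb_cont (l : List Char) (rest : List (List Char)) (body : List Char) (pos : Nat)
    (h : PySem.Chars.endswith body ['\\', '\n'] = true) :
    pvAbsorb (l :: rest) body pos = pvAbsorb rest (body ++ l) (pos + l.length) := by
  rw [pvAbsorb.eq_def]
  simp [h]

theorem pvBLoop_nil (pos ns : Nat) (norm : List (List Char)) (frags : List (Bool × Int × String)) :
    pvBLoop [] pos ns norm frags =
      if norm ≠ [] then
        frags ++ [(false, (ns : Int), String.ofList (PySem.Chars.join [] norm))]
      else frags := by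
  rw [pvBLoop]

theorem pvBLoop_norm (ln : List Char) (rest : List (List Char)) (pos ns : Nat)
    (norm : List (List Char)) (frags : List (Bool × Int × String))
    (h : PySem.Chars.startswith ln ['#'] = false) :
    pvBLoop (ln :: rest) pos ns norm frags =
      pvBLoop rest (pos + ln.length) (if norm = [] then pos else ns) (norm ++ [ln]) frags := by
  rw [pvBLoop]
  simp [h]

theorem pvBLoop_hash_nonorm (ln : List Char) (rest : List (List Char)) (pos ns : Nat)
    (frags : List (Bool × Int × String))
    (h : PySem.Chars.startswith ln ['#'] = true) :
    pvBLoop (ln :: rest) pos ns [] frags =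
      pvBLoop (pvAbsorb rest ln (pos + ln.length)).2.2 (pvAbsorb rest ln (pos + ln.length)).2.1
        (pvAbsorb rest ln (pos + ln.length)).2.1 []
        (frags ++ [(true, (pos : Int), String.ofList (pvAbsorb rest ln (pos + ln.length)).1)]) := by
  rw [pvBLoop]
  simp [h]

theorem pvBLoop_hash_norm (ln : List Char) (rest : List (List Char)) (pos ns : Nat)
    (norm : List (List Char)) (frags : List (Bool × Int × String))
    (h : PySem.Chars.startswith ln ['#'] = true) (hn : norm ≠ []) :
    pvBLoop (ln :: rest) pos ns norm frags =
      pvBLoop (pvAbsorb rest ln (pos + ln.length)).2.2 (pvAbsorb rest ln (pos + ln.length)).2.1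
        (pvAbsorb rest ln (pos + ln.length)).2.1 []
        ((if (PySem.Chars.join [] norm).dropLast ≠ [] then
            frags ++ [(false, (ns : Int), String.ofList ((PySem.Chars.join [] norm).dropLast))]
          else frags)
          ++ [(true, (pos : Int),
                String.ofList ('\n' :: (pvAbsorb rest ln (pos + ln.length)).1))]) := by
  rw [pvBLoop]
  simp only [h, if_true, hn, ne_eq, not_false_iff, PySem.List.slice_to_neg_one]
  by_cases ht : (PySem.Chars.join [] norm).dropLast = [] <;> simp [ht]

theorem pvALoop_stop (cs : List Char) (offset : Nat) (frags : List (Bool × Int × String))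
    (h : ¬ offset < cs.length) : pvALoop cs offset frags = frags := by
  rw [pvALoop]
  simp [h]

theorem pvALoop_nofind (cs : List Char) (offset : Nat) (frags : List (Bool × Int × String))
    (hlt : offset < cs.length)
    (hh : ¬ PySem.List.pyGet? cs (offset : Int) = some '#')
    (hfind : PySem.Chars.findFrom cs ['\n', '#'] (offset : Int) none = -1) :
    pvALoop cs offset frags =
      frags ++ [(false, (offset : Int),
        String.ofList (PySem.List.slice cs (some (offset : Int)) none))] := by
  rw [pvALoop, dif_pos hlt, if_neg hh]
  rw [dif_pos (show ((PySem.Chars.findFrom cs ['\n', '#'] (offset : Int) none, 2) : Int × Nat).1 = -1 from hfind)]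

theorem pvALoop_hash (cs : List Char) (offset : Nat) (frags : List (Bool × Int × String))
    (hlt : offset < cs.length)
    (hh : PySem.List.pyGet? cs (offset : Int) = some '#') :
    pvALoop cs offset frags =
      match pvAInner cs (offset + 1) with
      | none =>
          frags ++ [(true, (offset : Int),
            String.ofList (PySem.List.slice cs (some (offset : Int)) none))]
      | some fr =>
          pvALoop cs (fr + 1)
            (frags ++ [(true, (offset : Int),
              String.ofList (PySem.List.slice cs (some (offset : Int)) (some ((fr : Int) + 1))))]) := by
  rw [pvALoop, dif_pos hlt, if_pos hh]
  rw [dif_neg (show ¬(((offset : Int), (1 : Nat)).1 = -1) by dsimp only; omega)]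
  rw [if_neg (show ¬((offset : Int) ≠ (((offset : Int), (1 : Nat)) : Int × Nat).1) by dsimp only; simp)]
  dsimp only
  simp only [Int.toNat_natCast]
  split
  · rename_i heq
    rw [heq]
    norm_num
  · rename_i fr heq
    rw [heq]
    norm_num

theorem pvALoop_find (cs : List Char) (offset lm : Nat) (frags : List (Bool × Int × String))
    (hlt : offset < cs.length)
    (hh : ¬ PySem.List.pyGet? cs (offset : Int) = some '#')
    (hfind : PySem.Chars.findFrom cs ['\n', '#'] (offset : Int) none = (lm : Int)) :
    pvALoop cs offset frags =
      match pvAInner cs (lm + 2) with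
      | none =>
          (if (offset : Int) ≠ (lm : Int) then
            frags ++ [(false, (offset : Int),
              String.ofList (PySem.List.slice cs (some (offset : Int)) (some (lm : Int))))]
          else frags)
          ++ [(true, (lm : Int) + 1,
            String.ofList (PySem.List.slice cs (some (lm : Int)) none))]
      | some fr =>
          pvALoop cs (fr + 1)
            ((if (offset : Int) ≠ (lm : Int) then
              frags ++ [(false, (offset : Int),
                String.ofList (PySem.List.slice cs (some (offset : Int)) (some (lm : Int))))]
            else frags)
            ++ [(true, (lm : Int) + 1,
              String.ofList (PySem.List.slice cs (some (lm : Int)) (some ((fr : Int) + 1))))]) := by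
  rw [pvALoop, dif_pos hlt, if_neg hh, hfind]
  rw [dif_neg (show ¬(((lm : Int), (2 : Nat)).1 = -1) by dsimp only; omega)]
  dsimp only
  simp only [Int.toNat_natCast, dite_eq_ite]
  have harith : ((lm : Int)) + (((2 : Nat) : Int)) - 1 = (lm : Int) + 1 := by push_cast; ring
  rw [harith]
  split
  · rename_i heq
    rw [heq]
  · rename_i fr heq
    rw [heq]

-- ---------- the lines builder ----------

def pvStep (st : List (List Char) × List Char) (ch : Char) : List (List Char) × List Char :=
  let cur := st.2 ++ [ch]
  if ch = '\n' then (st.1 ++ [cur], []) else (st.1, cur)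

theorem pvBLines_eq (cs : List Char) :
    pvBLines cs =
      (let st := cs.foldl pvStep ([], [])
       if st.2 ≠ [] then st.1 ++ [st.2] else st.1) := rfl

theorem pvBLines_go (cs : List Char) :
    ∀ (acc : List (List Char)) (cur : List Char),
    (∀ l ∈ acc, l ≠ [] ∧ '\n' ∉ l.dropLast) →
    (∀ l ∈ acc, l.getLast? = some '\n') →
    '\n' ∉ cur →
    pvGood (let st := cs.foldl pvStep (acc, cur); if st.2 ≠ [] then st.1 ++ [st.2] else st.1)
    ∧ (let st := cs.foldl pvStep (acc, cur);
        (if st.2 ≠ [] then st.1 ++ [st.2] else st.1).flatten) = acc.flatten ++ cur ++ cs := by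
  induction cs with
  | nil =>
    intro acc cur h1 h2 hcur
    simp only [List.foldl_nil]
    by_cases hc : cur = []
    · subst hc
      rw [if_neg (show ¬(([] : List Char) ≠ []) by simp)]
      refine ⟨⟨h1, fun l hl => h2 l ((List.dropLast_sublist _).subset hl)⟩, by simp⟩
    · rw [if_pos (show (cur ≠ []) from hc)]
      constructor
      · constructor
        · intro l hl
          rcases List.mem_append.mp hl with h | h
          · exact h1 l h
          · simp only [List.mem_singleton] at h
            subst h
            exact ⟨hc, fun hmem => hcur ((List.dropLast_sublist _).subset hmem)⟩
        · rw [List.dropLast_concat]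
          exact h2
      · simp
  | cons c cs' ih =>
    intro acc cur h1 h2 hcur
    simp only [List.foldl_cons]
    by_cases hc : c = '\n'
    · subst hc
      have hstep : pvStep (acc, cur) '\n' = (acc ++ [cur ++ ['\n']], []) := by
        simp [pvStep]
      rw [hstep]
      have := ih (acc ++ [cur ++ ['\n']]) []
        (by
          intro l hl
          rcases List.mem_append.mp hl with h | h
          · exact h1 l h
          · simp only [List.mem_singleton] at h
            subst h
            refine ⟨by simp, ?_⟩
            rw [List.dropLast_concat]
            exact hcur)
        (by
          intro l hl
          rcases List.mem_append.mp hl with h | h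
          · exact h2 l h
          · simp only [List.mem_singleton] at h
            subst h
            exact List.getLast?_concat)
        (by simp)
      refine ⟨this.1, ?_⟩
      rw [this.2]
      simp
    · have hstep : pvStep (acc, cur) c = (acc, cur ++ [c]) := by
        simp [pvStep, hc]
      rw [hstep]
      have := ih acc (cur ++ [c]) h1 h2
        (by
          intro hmem
          rcases List.mem_append.mp hmem with h | h
          · exact hcur h
          · simp only [List.mem_singleton] at h
            exact hc h.symm)
      refine ⟨this.1, ?_⟩
      rw [this.2]
      simp

theorem pvBLines_spec (cs : List Char) :
    pvGood (pvBLines cs) ∧ (pvBLines cs).flatten = cs := by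
  have := pvBLines_go cs [] [] (by simp) (by simp) (by simp)
  rw [pvBLines_eq]
  refine ⟨this.1, ?_⟩
  rw [this.2]
  simp

-- ---------- the inner loops agree ----------

theorem pvDropLast_cons {α : Type} {a : α} {l : List α} (h : l ≠ []) :
    (a :: l).dropLast = a :: l.dropLast := by
  cases l with
  | nil => exact absurd rfl h
  | cons b t => rfl

theorem pvNotMem_of {t : List Char} (h1 : '\n' ∉ t.dropLast) (h2 : t.getLast? ≠ some '\n') :
    '\n' ∉ t := by
  intro hm
  rcases eq_or_ne t [] with rfl | hne
  · simp at hm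
  · rw [← List.dropLast_append_getLast hne] at hm
    rcases List.mem_append.mp hm with h | h
    · exact h1 h
    · rw [List.mem_singleton] at h
      exact h2 (by rw [List.getLast?_eq_some_getLast hne, h])

theorem pvInnerStep (cs b0 t0 z : List Char) (bs : Nat) (hb0 : b0 ≠ [])
    (hd : cs.drop bs = (b0 ++ (t0 ++ ['\n'])) ++ z) (ht0 : '\n' ∉ t0) :
    PySem.Chars.findFrom cs ['\n'] ((bs + b0.length : Nat) : Int) none
        = ((bs + b0.length + t0.length : Nat) : Int)
    ∧ ((PySem.List.pyGet? cs (((bs + b0.length + t0.length : Nat) : Int) - 1) = some '\\')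
        ↔ (b0 ++ t0).getLast? = some '\\')
    ∧ (PySem.Chars.endswith (b0 ++ (t0 ++ ['\n'])) ['\\', '\n'] = true
        ↔ (b0 ++ t0).getLast? = some '\\') := by
  have hb0l : 0 < b0.length := List.length_pos_iff.mpr hb0
  have hdropf : cs.drop (bs + b0.length) = t0 ++ '\n' :: z := by
    rw [← List.drop_drop, hd,
      show (b0 ++ (t0 ++ ['\n'])) ++ z = b0 ++ (t0 ++ '\n' :: z) by simp,
      List.drop_left]
  refine ⟨pvFindNL cs t0 z (bs + b0.length) hdropf ht0, ?_, ?_⟩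
  · have hcast : (((bs + b0.length + t0.length : Nat) : Int) - 1)
        = ((bs + b0.length + t0.length - 1 : Nat) : Int) := by omega
    rw [hcast, PySem.List.pyGet?_natCast]
    have hidx : cs[bs + b0.length + t0.length - 1]? = (b0 ++ t0).getLast? := by
      have h1 : (cs.drop bs)[b0.length + t0.length - 1]? = cs[bs + (b0.length + t0.length - 1)]? :=
        List.getElem?_drop
      rw [show bs + b0.length + t0.length - 1 = bs + (b0.length + t0.length - 1) by omega, ← h1, hd]
      rw [show (b0 ++ (t0 ++ ['\n'])) ++ z = (b0 ++ t0) ++ ('\n' :: z) by simp]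
      rw [List.getElem?_append_left (by rw [List.length_append]; omega)]
      rw [List.getLast?_eq_getElem?]
      congr 1
      rw [List.length_append]
    rw [hidx]
  · rw [show b0 ++ (t0 ++ ['\n']) = (b0 ++ t0) ++ ['\n'] by simp]
    exact pvEndswith_concat _

theorem pvInner (cs : List Char) (M : List (List Char)) :
    ∀ (b0 t : List Char) (bs : Nat),
    b0 ≠ [] →
    cs.drop bs = (b0 ++ t) ++ M.flatten →
    '\n' ∉ t.dropLast →
    pvGood M →
    (M ≠ [] → t.getLast? = some '\n') →
    (pvAInner cs (bs + b0.length) = none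
        ∧ pvAbsorb M (b0 ++ t) (bs + (b0 ++ t).length)
            = ((b0 ++ t) ++ M.flatten, bs + (b0 ++ t).length + M.flatten.length, []))
    ∨ (∃ fr M' body',
        pvAInner cs (bs + b0.length) = some fr
        ∧ pvAbsorb M (b0 ++ t) (bs + (b0 ++ t).length) = (body', fr + 1, M')
        ∧ body' ++ M'.flatten = (b0 ++ t) ++ M.flatten
        ∧ fr + 1 = bs + body'.length
        ∧ M' <:+ M) := by
  induction M with
  | nil =>
    intro b0 t bs hb0 hd htdl hGM hcoh
    simp only [List.flatten_nil, List.append_nil, List.length_nil, Nat.add_zero] at hd ⊢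
    have hbslt : bs < cs.length := pvDrop_ne_nil_lt (by rw [hd]; simp [hb0])
    have hlen := congrArg List.length hd
    rw [List.length_drop] at hlen
    by_cases hend : t.getLast? = some '\n'
    · obtain ⟨t0, rfl⟩ := List.getLast?_eq_some_iff.mp hend
      have ht0 : '\n' ∉ t0 := by rwa [List.dropLast_concat] at htdl
      obtain ⟨hfind, htest, hends⟩ := pvInnerStep cs b0 t0 [] bs hb0 (by rw [hd]; simp) ht0
      have hblen : (b0 ++ (t0 ++ ['\n'])).length = b0.length + t0.length + 1 := by
        simp only [List.length_append, List.length_cons, List.length_nil]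
        omega
      rw [hblen] at hlen
      by_cases hC : (b0 ++ t0).getLast? = some '\\'
      · left
        refine ⟨?_, by rw [pvAbsorb_nil]⟩
        rw [pvAInner_cont cs (bs + b0.length) (bs + b0.length + t0.length) hfind (htest.mpr hC)]
        apply pvAInner_none_of
        apply pvFindNL_none
        · omega
        · have hnil : cs.drop (bs + b0.length + t0.length + 1) = [] :=
            List.drop_eq_nil_of_le (by omega)
          rw [hnil]
          simp
      · right
        refine ⟨bs + b0.length + t0.length, [], b0 ++ (t0 ++ ['\n']), ?_, ?_, by simp,
          by rw [hblen]; omega, List.nil_suffix⟩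
        · exact pvAInner_break cs _ _ hfind (fun hc => hC (htest.mp hc))
        · rw [pvAbsorb_nil,
            show bs + (b0 ++ (t0 ++ ['\n'])).length = bs + b0.length + t0.length + 1 by
              rw [hblen]; omega]
    · have hnot : '\n' ∉ t := pvNotMem_of htdl hend
      left
      refine ⟨?_, by rw [pvAbsorb_nil]⟩
      apply pvAInner_none_of
      rw [List.length_append] at hlen
      apply pvFindNL_none
      · omega
      · have hdt : cs.drop (bs + b0.length) = t := by
          rw [← List.drop_drop, hd, List.drop_left]
        rw [hdt]
        exact hnot
  | cons l M'' ih =>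
    intro b0 t bs hb0 hd htdl hGM hcoh
    obtain ⟨t0, rfl⟩ := List.getLast?_eq_some_iff.mp (hcoh (by simp))
    have ht0 : '\n' ∉ t0 := by rwa [List.dropLast_concat] at htdl
    have hdz : cs.drop bs = (b0 ++ (t0 ++ ['\n'])) ++ (l ++ M''.flatten) := by
      rw [hd]; simp
    obtain ⟨hfind, htest, hends⟩ := pvInnerStep cs b0 t0 (l ++ M''.flatten) bs hb0 hdz ht0
    have hblen : (b0 ++ (t0 ++ ['\n'])).length = b0.length + t0.length + 1 := by
      simp only [List.length_append, List.length_cons, List.length_nil]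
      omega
    by_cases hC : (b0 ++ t0).getLast? = some '\\'
    · have hstepA := pvAInner_cont cs (bs + b0.length) (bs + b0.length + t0.length) hfind
        (htest.mpr hC)
      have hstepB := pvAbsorb_cont l M'' (b0 ++ (t0 ++ ['\n']))
        (bs + (b0 ++ (t0 ++ ['\n'])).length) (hends.mpr hC)
      have harg : bs + b0.length + t0.length + 1 = bs + (b0 ++ (t0 ++ ['\n'])).length := by
        rw [hblen]; omega
      have e1 : bs + (b0 ++ (t0 ++ ['\n'])).length + l.length
          = bs + ((b0 ++ (t0 ++ ['\n'])) ++ l).length := by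
        simp only [List.length_append]
        omega
      have hIH := ih (b0 ++ (t0 ++ ['\n'])) l bs (by simp)
        (by rw [hdz]; simp)
        ((hGM.1 l (by simp)).2)
        (pvGood_tail hGM)
        (fun hne => by
          apply hGM.2
          rw [pvDropLast_cons hne]
          simp)
      rcases hIH with ⟨hnone, habs⟩ | ⟨fr, M', body', hsome, habs, hcat, hfr1, hsuf⟩
      · left
        constructor
        · rw [hstepA, harg]
          exact hnone
        · rw [hstepB, e1, habs]
          have c1 : (b0 ++ (t0 ++ ['\n'])) ++ l ++ M''.flatten
              = (b0 ++ (t0 ++ ['\n'])) ++ (l :: M'').flatten := by simp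
          have c2 : bs + ((b0 ++ (t0 ++ ['\n'])) ++ l).length + M''.flatten.length
              = bs + (b0 ++ (t0 ++ ['\n'])).length + ((l :: M'').flatten).length := by
            simp only [List.length_append, List.flatten_cons]
            omega
          rw [c1, c2]
      · right
        refine ⟨fr, M', body', ?_, ?_, ?_, hfr1, hsuf.trans (List.suffix_cons l M'')⟩
        · rw [hstepA, harg]
          exact hsome
        · rw [hstepB, e1]
          exact habs
        · rw [hcat]
          simp
    · right
      have hstop : PySem.Chars.endswith (b0 ++ (t0 ++ ['\n'])) ['\\', '\n'] = false := by
        cases hb : PySem.Chars.endswith (b0 ++ (t0 ++ ['\n'])) ['\\', '\n'] with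
        | false => rfl
        | true => exact absurd (hends.mp hb) hC
      refine ⟨bs + b0.length + t0.length, l :: M'', b0 ++ (t0 ++ ['\n']), ?_, ?_, rfl,
        by rw [hblen]; omega, List.suffix_refl _⟩
      · exact pvAInner_break cs _ _ hfind (fun hc => hC (htest.mp hc))
      · rw [pvAbsorb_stop _ _ _ hstop,
          show bs + (b0 ++ (t0 ++ ['\n'])).length = bs + b0.length + t0.length + 1 by
            rw [hblen]; omega]

-- ---------- last line of a run of terminated lines ----------

theorem pvFlatten_concat_nl (norm : List (List Char)) (hne : norm ≠ [])
    (hnn : ∀ l ∈ norm, l ≠ []) (hend : ∀ l ∈ norm, l.getLast? = some '\n') :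
    ∃ u0, norm.flatten = u0 ++ ['\n'] := by
  have h := List.dropLast_append_getLast (l := norm) hne
  obtain ⟨l0, hl0⟩ := List.getLast?_eq_some_iff.mp
    (hend (norm.getLast hne) (List.getLast_mem hne))
  refine ⟨norm.dropLast.flatten ++ l0, ?_⟩
  conv_lhs => rw [← h]
  rw [List.flatten_append]
  simp [hl0]

-- ---------- main loop correspondence ----------

theorem pvGood_prefix_norm {norm L : List (List Char)} (h : pvGood (norm ++ L)) (hL : L ≠ []) :
    pvGood norm ∧ ∀ l ∈ norm, l.getLast? = some '\n' := by
  have hall : ∀ l ∈ norm, l.getLast? = some '\n' := by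
    intro l hl
    apply h.2
    rw [List.dropLast_append_of_ne_nil hL]
    exact List.mem_append_left _ hl
  exact ⟨⟨fun l hl => h.1 l (List.mem_append_left _ hl),
    fun l hl => hall l ((List.dropLast_sublist _).subset hl)⟩, hall⟩

theorem pvHeadNotHash (cs : List Char) (ns : Nat) (norm : List (List Char)) (y : List Char)
    (hn : norm ≠ []) (hd : cs.drop ns = norm.flatten ++ y)
    (hne : ∀ l ∈ norm, l ≠ [])
    (h3 : ∀ l ∈ norm, PySem.Chars.startswith l ['#'] = false) :
    ¬ PySem.List.pyGet? cs (ns : Int) = some '#' := by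
  rw [PySem.List.pyGet?_natCast]
  cases norm with
  | nil => exact absurd rfl hn
  | cons n0 nrest =>
    have hn0 : n0 ≠ [] := hne n0 (by simp)
    have h0 : (cs.drop ns)[0]? = cs[ns + 0]? := List.getElem?_drop
    rw [hd, List.flatten_cons, List.append_assoc,
      List.getElem?_append_left (List.length_pos_iff.mpr hn0), Nat.add_zero] at h0
    have hns0 := h3 n0 (by simp)
    rw [← Bool.not_eq_true, pvStartswith_hash_iff] at hns0
    intro hc
    exact hns0 (h0.trans hc)

theorem pvMainNil (cs : List Char) (norm : List (List Char)) (ns : Nat)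
    (frags : List (Bool × Int × String))
    (h1 : cs.drop ns = norm.flatten)
    (h2 : pvGood norm)
    (h3 : ∀ l ∈ norm, PySem.Chars.startswith l ['#'] = false) :
    pvALoop cs ns frags = pvBLoop [] (ns + norm.flatten.length) ns norm frags := by
  rw [pvBLoop_nil]
  by_cases hn : norm = []
  · subst hn
    simp only [List.flatten_nil] at h1
    have hle : cs.length ≤ ns := by
      by_contra hc
      have hlen := congrArg List.length h1
      rw [List.length_drop] at hlen
      simp at hlen
      omega
    rw [pvALoop_stop cs ns frags (by omega)]
    simp
  · have hflat_ne : norm.flatten ≠ [] := pvFlatten_ne_nil (fun l hl => (h2.1 l hl).1) hn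
    have hlt : ns < cs.length := pvDrop_ne_nil_lt (by rw [h1]; exact hflat_ne)
    have hh := pvHeadNotHash cs ns norm [] hn (by rw [h1, List.append_nil])
      (fun l hl => (h2.1 l hl).1) h3
    rw [pvALoop_nofind cs ns frags hlt hh (pvFindNH_none cs ns norm (by omega) h1 h2 h3)]
    rw [PySem.List.slice_from_natCast, h1, if_pos hn, pvJoin_flatten]

theorem pvMain (cs : List Char) :
    ∀ (n : Nat) (L norm : List (List Char)) (ns : Nat) (frags : List (Bool × Int × String)),
    L.length ≤ n →
    cs.drop ns = norm.flatten ++ L.flatten →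
    pvGood (norm ++ L) →
    (∀ l ∈ norm, PySem.Chars.startswith l ['#'] = false) →
    pvALoop cs ns frags = pvBLoop L (ns + norm.flatten.length) ns norm frags := by
  intro n
  induction n with
  | zero =>
    intro L norm ns frags hlen h1 h2 h3
    have hL : L = [] := List.eq_nil_of_length_eq_zero (by omega)
    subst hL
    exact pvMainNil cs norm ns frags (by simpa using h1) (by simpa using h2) h3
  | succ n ih =>
    intro L norm ns frags hlen h1 h2 h3
    cases L with
    | nil => exact pvMainNil cs norm ns frags (by simpa using h1) (by simpa using h2) h3
    | cons ln rest =>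
      have hGL : pvGood (ln :: rest) := pvGood_suffix ⟨norm, rfl⟩ h2
      have hln_ne : ln ≠ [] := (hGL.1 ln (by simp)).1
      have hrlen : rest.length ≤ n := by simp at hlen; omega
      by_cases hhash : PySem.Chars.startswith ln ['#'] = true
      · obtain ⟨ln', rfl⟩ : ∃ ln', ln = '#' :: ln' := by
          rw [pvStartswith_hash_iff] at hhash
          cases ln with
          | nil => simp at hhash
          | cons c tl =>
            rw [List.getElem?_cons_zero, Option.some_inj] at hhash
            exact ⟨tl, by rw [hhash]⟩
        have hdl' : '\n' ∉ ln'.dropLast := by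
          have hno := (hGL.1 ('#' :: ln') (by simp)).2
          intro hm
          apply hno
          have hln'ne : ln' ≠ [] := by
            intro hc
            rw [hc] at hm
            simp at hm
          rw [pvDropLast_cons hln'ne]
          simp [hm]
        have hcoh : rest ≠ [] → ('#' :: ln').getLast? = some '\n' := fun hne => hGL.2 _ (by
          cases rest with
          | nil => exact absurd rfl hne
          | cons a b => simp)
        have hcoh' : rest ≠ [] → ln'.getLast? = some '\n' := by
          intro hne
          have h := hcoh hne
          cases ln' with
          | nil => simp at h
          | cons a b => rwa [List.getLast?_cons_cons] at h
        rw [List.flatten_cons] at h1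
        by_cases hn : norm = []
        · subst hn
          simp only [List.flatten_nil, List.length_nil, Nat.add_zero, List.nil_append] at h1 ⊢
          have hlt : ns < cs.length := pvDrop_ne_nil_lt (by rw [h1]; simp)
          have hh : PySem.List.pyGet? cs (ns : Int) = some '#' := by
            rw [PySem.List.pyGet?_natCast]
            have h0 : (cs.drop ns)[0]? = cs[ns + 0]? := List.getElem?_drop
            rw [h1, List.cons_append, List.getElem?_cons_zero, Nat.add_zero] at h0
            exact h0.symm
          rw [pvALoop_hash cs ns frags hlt hh]
          rw [pvBLoop_hash_nonorm _ _ _ _ _ hhash]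
          have hInner := pvInner cs rest ['#'] ln' ns (by simp)
            (by rw [h1]; simp) hdl' (pvGood_tail hGL) hcoh'
          simp only [List.singleton_append, List.length_cons, List.length_nil,
            Nat.zero_add] at hInner
          simp only [List.length_cons]
          rcases hInner with ⟨hA, hB⟩ | ⟨fr, M', body', hA, hB, hcat, hfr1, hsuf⟩
          · rw [hA, hB]
            dsimp only
            rw [pvBLoop_nil]
            rw [if_neg (show ¬(([] : List (List Char)) ≠ []) by simp)]
            rw [PySem.List.slice_from_natCast, h1]
          · rw [hA, hB]
            dsimp only
            have hslice : PySem.List.slice cs (some (ns : Int)) (some ((fr : Int) + 1)) = body' := by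
              rw [show ((fr : Int) + 1) = ((fr + 1 : Nat) : Int) by push_cast; ring]
              rw [PySem.List.slice_natCast]
              rw [show cs.drop ns = body' ++ M'.flatten by rw [h1, ← hcat]]
              exact List.take_left' (by omega)
            rw [hslice]
            have hdrop' : cs.drop (fr + 1) = M'.flatten := by
              rw [hfr1, ← List.drop_drop,
                show cs.drop ns = body' ++ M'.flatten by rw [h1, ← hcat], List.drop_left]
            have hGM' : pvGood M' :=
              pvGood_suffix (hsuf.trans (List.suffix_cons ('#' :: ln') rest)) hGL
            have hrec := ih M' [] (fr + 1) (frags ++ [(true, (ns : Int), String.ofList body')])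
              (le_trans hsuf.length_le hrlen)
              (by simpa using hdrop') (by simpa using hGM') (by simp)
            simpa using hrec
        · obtain ⟨hGnorm, hnormend⟩ := pvGood_prefix_norm h2 (by simp)
          obtain ⟨u0, hu0⟩ := pvFlatten_concat_nl norm hn (fun l hl => (hGnorm.1 l hl).1) hnormend
          have h1' : cs.drop ns = u0 ++ '\n' :: '#' :: (ln' ++ rest.flatten) := by
            rw [h1, hu0]; simp
          have hlt : ns < cs.length := pvDrop_ne_nil_lt (by rw [h1']; simp)
          have hh := pvHeadNotHash cs ns norm (('#' :: ln') ++ rest.flatten) hn h1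
            (fun l hl => (hGnorm.1 l hl).1) h3
          have hfree : ∀ j, j + 1 ≤ u0.length → ¬ (['\n', '#'] <+: cs.drop (ns + j)) := by
            intro j hj hpre
            rw [pvPrefix_two] at hpre
            obtain ⟨hc1, hc2⟩ := hpre
            have e0 : (cs.drop (ns + j))[0]? = cs[ns + j + 0]? := List.getElem?_drop
            have e1 : (cs.drop (ns + j))[1]? = cs[ns + j + 1]? := List.getElem?_drop
            rw [e0, Nat.add_zero] at hc1
            rw [e1] at hc2
            have hjlt : j + 1 < norm.flatten.length := by
              rw [hu0, List.length_append]
              simp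
              omega
            have f0 : cs[ns + j]? = norm.flatten[j]? := by
              have h := (List.getElem?_drop (xs := cs) (i := ns) (j := j)).symm
              rw [h1, List.getElem?_append_left (by omega)] at h
              exact h
            have f1 : cs[ns + j + 1]? = norm.flatten[j + 1]? := by
              have h := (List.getElem?_drop (xs := cs) (i := ns) (j := j + 1)).symm
              rw [h1, List.getElem?_append_left (by omega),
                show ns + (j + 1) = ns + j + 1 by omega] at h
              exact h
            exact pvNH_flat norm hGnorm h3 j (by omega)
              ⟨by rw [← f0]; exact hc1, by rw [← f1]; exact hc2⟩
          have hfind := pvFindNH_pos cs u0 (ln' ++ rest.flatten) ns h1' hfree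
          rw [pvALoop_find cs ns (ns + u0.length) frags hlt hh hfind]
          rw [pvBLoop_hash_norm _ _ _ _ _ _ hhash hn]
          have hjoin : (PySem.Chars.join [] norm).dropLast = u0 := by
            rw [pvJoin_flatten, hu0, List.dropLast_concat]
          rw [hjoin]
          have hpos : ns + norm.flatten.length = ns + u0.length + 1 := by
            rw [hu0]
            simp only [List.length_append, List.length_cons, List.length_nil]
            omega
          rw [hpos]
          have hcond : ((ns : Int) ≠ ((ns + u0.length : Nat) : Int)) ↔ u0 ≠ [] := by
            constructor
            · intro hne hnil
              apply hne
              rw [hnil]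
              simp
            · intro hne heq
              apply hne
              have hl0 : u0.length = 0 := by omega
              exact List.eq_nil_of_length_eq_zero hl0
          have hsliceN : PySem.List.slice cs (some (ns : Int)) (some ((ns + u0.length : Nat) : Int))
              = u0 := by
            rw [PySem.List.slice_natCast, h1']
            exact List.take_left' (by omega)
          have hdroplm : cs.drop (ns + u0.length) = '\n' :: (('#' :: ln') ++ rest.flatten) := by
            rw [← List.drop_drop, h1', List.drop_left]
            simp
          have hofs : (((ns + u0.length : Nat) : Int)) + 1 = (((ns + u0.length + 1 : Nat)) : Int) := by
            push_cast
            ring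
          have hInner := pvInner cs rest ['#'] ln' (ns + u0.length + 1) (by simp)
            (by rw [← List.drop_drop, hdroplm]; simp) hdl' (pvGood_tail hGL) hcoh'
          simp only [List.singleton_append, List.length_cons, List.length_nil,
            Nat.zero_add] at hInner
          have hfixA : ns + u0.length + 2 = ns + u0.length + 1 + 1 := by omega
          simp only [List.length_cons]
          rcases hInner with ⟨hA, hB⟩ | ⟨fr, M', body', hA, hB, hcat, hfr1, hsuf⟩
          · rw [hfixA, hA, hB]
            dsimp only
            rw [pvBLoop_nil]
            rw [if_neg (show ¬(([] : List (List Char)) ≠ []) by simp)]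
            rw [PySem.List.slice_from_natCast, hdroplm, hsliceN, hofs]
            rw [if_congr hcond rfl rfl]
          · rw [hfixA, hA, hB]
            dsimp only
            have hslice2 : PySem.List.slice cs (some ((ns + u0.length : Nat) : Int))
                (some ((fr : Int) + 1)) = '\n' :: body' := by
              rw [show ((fr : Int) + 1) = ((fr + 1 : Nat) : Int) by push_cast; ring]
              rw [PySem.List.slice_natCast, hdroplm]
              rw [show ('#' :: ln') ++ rest.flatten = body' ++ M'.flatten from hcat.symm]
              rw [show fr + 1 - (ns + u0.length) = body'.length + 1 by omega]
              rw [List.take_succ_cons, List.take_left' rfl]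
            rw [hslice2, hsliceN, hofs]
            rw [if_congr hcond rfl rfl]
            have hdrop' : cs.drop (fr + 1) = M'.flatten := by
              rw [hfr1, ← List.drop_drop]
              rw [show cs.drop (ns + u0.length + 1) = body' ++ M'.flatten by
                rw [← List.drop_drop, hdroplm, ← hcat]
                simp]
              rw [List.drop_left]
            have hGM' : pvGood M' :=
              pvGood_suffix (hsuf.trans (List.suffix_cons ('#' :: ln') rest)) hGL
            have hrec := ih M' [] (fr + 1)
              ((if u0 ≠ [] then
                  frags ++ [(false, (ns : Int), String.ofList u0)]
                else frags)
                ++ [(true, ((ns + u0.length + 1 : Nat) : Int), String.ofList ('\n' :: body'))])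
              (le_trans hsuf.length_le hrlen)
              (by simpa using hdrop') (by simpa using hGM') (by simp)
            simpa using hrec
      · have hhf : PySem.Chars.startswith ln ['#'] = false := by
          cases hb : PySem.Chars.startswith ln ['#'] with
          | false => rfl
          | true => exact absurd hb hhash
        rw [pvBLoop_norm _ _ _ _ _ _ hhf]
        have hifns : (if norm = [] then ns + norm.flatten.length else ns) = ns := by
          by_cases h : norm = [] <;> simp [h]
        rw [hifns]
        have hrec := ih rest (norm ++ [ln]) ns frags hrlen
          (by
            rw [h1, List.flatten_append, List.flatten_cons]
            simp)
          (by rw [show (norm ++ [ln]) ++ rest = norm ++ ln :: rest by simp]; exact h2)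
          (by
            intro l hl
            rcases List.mem_append.mp hl with h | h
            · exact h3 l h
            · rw [List.mem_singleton] at h
              subst h
              exact hhf)
        rw [hrec]
        congr 1
        simp only [List.flatten_append, List.length_append, List.flatten_cons,
          List.flatten_nil, List.append_nil]
        omega
-- ===== VERDICT (by name: the statement is the Claim_ definition above) =====
theorem split_source_by_preprocess_commands_spec : Claim_equal_split_source_by_preprocess_commands := by
  intro source _
  show split_source_by_preprocess_commands source = split_source_by_preprocess_commands_alt source
  rw [split_source_by_preprocess_commands, split_source_by_preprocess_commands_alt]
  obtain ⟨hG, hF⟩ := pvBLines_spec source.toList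
  have := pvMain source.toList (pvBLines source.toList).length (pvBLines source.toList) [] 0 []
    (le_refl _) (by simp [hF]) (by simpa using hG) (by simp)
  simpa using this
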